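-- pv_equiv track=rewrite | github.com/Yashwanth-AL/Test_Case_Generator | backend/app/ml/test_case_generator.py | _generate_contextual_preconditions
-- ===== SOURCE A (Python) =====
-- from typing import List, Optional, Dict
--
-- def _generate_contextual_preconditions(
--
--     action: str,
--     subject: str,
--     device: str,
--     description: str,
-- ) -> List[str]:
--     """Generate preconditions specific to the feature"""
--     preconditions: List[str] = []
--     text = f"{subject} {device} {description}".lower()
--
--     preconditions.append(
--         f"{device if device else 'System'} is powered ON and connected to the network"
--     )
--     if any(kw in text for kw in ['web', 'browser', 'interface', 'http', 'ui']):
--         preconditions.append("Web browser is available and up to date")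
--     if action in ['configure', 'enable', 'disable', 'update', 'test']:
--         preconditions.append("Admin credentials are available")
--     if any(kw in text for kw in ['firmware', 'update', 'upgrade', 'flash']):
--         preconditions.append("Firmware / update file is downloaded and available")
--     if any(kw in text for kw in ['modbus', 'rs-485', 'serial', 'rs485']):
--         preconditions.append("Serial communication cable is connected")
--     if any(kw in text for kw in ['powertag', 'wireless', 'pairing', 'pair']):
--         preconditions.append("Device is in pairing / discovery mode")
--     if any(kw in text for kw in ['cloud', 'publication', 'remote', 'iot']):
--         preconditions.append("Internet connection is available")
--     if any(kw in text for kw in ['alarm', 'alert', 'threshold', 'overload']):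
--         preconditions.append("Monitoring / alarm thresholds are defined")
--
--     return preconditions[:5]
-- ===== SOURCE B (Python) =====
-- from typing import List
--
-- # Keyword-major version: one flat keyword->message scan builds the SET of fired
-- # messages; the output is then the fixed message order filtered by that set.
-- _KEYWORD_TO_MSG = [
--     ('web', "Web browser is available and up to date"),
--     ('browser', "Web browser is available and up to date"),
--     ('interface', "Web browser is available and up to date"),
--     ('http', "Web browser is available and up to date"),
--     ('ui', "Web browser is available and up to date"),
--     ('firmware', "Firmware / update file is downloaded and available"),
--     ('update', "Firmware / update file is downloaded and available"),
--     ('upgrade', "Firmware / update file is downloaded and available"),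
--     ('flash', "Firmware / update file is downloaded and available"),
--     ('modbus', "Serial communication cable is connected"),
--     ('rs-485', "Serial communication cable is connected"),
--     ('serial', "Serial communication cable is connected"),
--     ('rs485', "Serial communication cable is connected"),
--     ('powertag', "Device is in pairing / discovery mode"),
--     ('wireless', "Device is in pairing / discovery mode"),
--     ('pairing', "Device is in pairing / discovery mode"),
--     ('pair', "Device is in pairing / discovery mode"),
--     ('cloud', "Internet connection is available"),
--     ('publication', "Internet connection is available"),
--     ('remote', "Internet connection is available"),
--     ('iot', "Internet connection is available"),
--     ('alarm', "Monitoring / alarm thresholds are defined"),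
--     ('alert', "Monitoring / alarm thresholds are defined"),
--     ('threshold', "Monitoring / alarm thresholds are defined"),
--     ('overload', "Monitoring / alarm thresholds are defined"),
-- ]
--
-- _ADMIN_ACTIONS = ('configure', 'enable', 'disable', 'update', 'test')
-- _ADMIN_MSG = "Admin credentials are available"
--
-- _MSG_ORDER = [
--     "Web browser is available and up to date",
--     _ADMIN_MSG,
--     "Firmware / update file is downloaded and available",
--     "Serial communication cable is connected",
--     "Device is in pairing / discovery mode",
--     "Internet connection is available",
--     "Monitoring / alarm thresholds are defined",
-- ]
--
--
-- def _generate_contextual_preconditions(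
--     action: str,
--     subject: str,
--     device: str,
--     description: str,
-- ) -> List[str]:
--     text = f"{subject} {device} {description}".lower()
--     fired = set(msg for kw, msg in _KEYWORD_TO_MSG if kw in text)
--     if action in _ADMIN_ACTIONS:
--         fired.add(_ADMIN_MSG)
--     head = f"{device or 'System'} is powered ON and connected to the network"
--     return [head] + [m for m in _MSG_ORDER if m in fired][:4]
-- ===== Notes on version B (the rewrite author's own statement) =====
-- stated objective: alternative
-- what changed: Inverted the rule-major if-chain into a keyword-major flat (keyword,message) scan that builds a SET of fired messages, then emits the fixed message order filtered by membership in that set, with the cap expressed as head + first 4 fired messages.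
import Mathlib
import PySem

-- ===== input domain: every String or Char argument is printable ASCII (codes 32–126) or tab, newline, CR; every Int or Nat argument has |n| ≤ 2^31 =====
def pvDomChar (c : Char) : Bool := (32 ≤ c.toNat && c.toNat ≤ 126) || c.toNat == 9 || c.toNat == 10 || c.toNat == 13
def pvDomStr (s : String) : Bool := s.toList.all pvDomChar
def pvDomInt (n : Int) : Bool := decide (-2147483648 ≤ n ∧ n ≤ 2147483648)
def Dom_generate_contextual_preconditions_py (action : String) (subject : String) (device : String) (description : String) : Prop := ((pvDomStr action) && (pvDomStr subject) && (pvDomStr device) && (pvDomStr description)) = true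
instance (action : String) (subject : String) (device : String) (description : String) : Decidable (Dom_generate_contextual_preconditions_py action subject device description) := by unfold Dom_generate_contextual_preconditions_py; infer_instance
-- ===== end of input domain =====

-- B inverts A's rule-major if-chain into a keyword-major flat scan building a set of fired messages, then filters the fixed message order by that set (objective: alternative).


-- ===== PORT A =====
def generate_contextual_preconditions_py (action : String) (subject : String) (device : String) (description : String) : List String :=
  let preconditions : List String := []
  let text := PySem.Str.lower (subject ++ " " ++ device ++ " " ++ description)
  let preconditions := preconditions ++ [(if device = "" then "System" else device) ++ " is powered ON and connected to the network"]
  let preconditions := if (["web", "browser", "interface", "http", "ui"].any (fun kw => PySem.Str.isIn kw text)) then preconditions ++ ["Web browser is available and up to date"] else preconditions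
  let preconditions := if (["configure", "enable", "disable", "update", "test"].contains action) then preconditions ++ ["Admin credentials are available"] else preconditions
  let preconditions := if (["firmware", "update", "upgrade", "flash"].any (fun kw => PySem.Str.isIn kw text)) then preconditions ++ ["Firmware / update file is downloaded and available"] else preconditions
  let preconditions := if (["modbus", "rs-485", "serial", "rs485"].any (fun kw => PySem.Str.isIn kw text)) then preconditions ++ ["Serial communication cable is connected"] else preconditions
  let preconditions := if (["powertag", "wireless", "pairing", "pair"].any (fun kw => PySem.Str.isIn kw text)) then preconditions ++ ["Device is in pairing / discovery mode"] else preconditions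
  let preconditions := if (["cloud", "publication", "remote", "iot"].any (fun kw => PySem.Str.isIn kw text)) then preconditions ++ ["Internet connection is available"] else preconditions
  let preconditions := if (["alarm", "alert", "threshold", "overload"].any (fun kw => PySem.Str.isIn kw text)) then preconditions ++ ["Monitoring / alarm thresholds are defined"] else preconditions
  PySem.List.slice preconditions none (some 5)

-- ===== PORT B =====
-- flat keyword -> message table, scanned once to build the fired-message set
def pvKwMsgs : List (String × String) :=
  [ ("web", "Web browser is available and up to date"),
    ("browser", "Web browser is available and up to date"),
    ("interface", "Web browser is available and up to date"),
    ("http", "Web browser is available and up to date"),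
    ("ui", "Web browser is available and up to date"),
    ("firmware", "Firmware / update file is downloaded and available"),
    ("update", "Firmware / update file is downloaded and available"),
    ("upgrade", "Firmware / update file is downloaded and available"),
    ("flash", "Firmware / update file is downloaded and available"),
    ("modbus", "Serial communication cable is connected"),
    ("rs-485", "Serial communication cable is connected"),
    ("serial", "Serial communication cable is connected"),
    ("rs485", "Serial communication cable is connected"),
    ("powertag", "Device is in pairing / discovery mode"),
    ("wireless", "Device is in pairing / discovery mode"),
    ("pairing", "Device is in pairing / discovery mode"),
    ("pair", "Device is in pairing / discovery mode"),
    ("cloud", "Internet connection is available"),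
    ("publication", "Internet connection is available"),
    ("remote", "Internet connection is available"),
    ("iot", "Internet connection is available"),
    ("alarm", "Monitoring / alarm thresholds are defined"),
    ("alert", "Monitoring / alarm thresholds are defined"),
    ("threshold", "Monitoring / alarm thresholds are defined"),
    ("overload", "Monitoring / alarm thresholds are defined") ]

def pvMsgOrder : List String :=
  [ "Web browser is available and up to date",
    "Admin credentials are available",
    "Firmware / update file is downloaded and available",
    "Serial communication cable is connected",
    "Device is in pairing / discovery mode",
    "Internet connection is available",
    "Monitoring / alarm thresholds are defined" ]

def generate_contextual_preconditions_py_alt (action : String) (subject : String) (device : String) (description : String) : List String :=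
  let text := PySem.Str.lower (subject ++ " " ++ device ++ " " ++ description)
  let fired : PySem.Set String := PySem.Set.ofList ((pvKwMsgs.filter (fun p => PySem.Str.isIn p.1 text)).map Prod.snd)
  let fired := if (["configure", "enable", "disable", "update", "test"].contains action) then PySem.Set.add fired "Admin credentials are available" else fired
  let head := (if device = "" then "System" else device) ++ " is powered ON and connected to the network"
  [head] ++ PySem.List.slice (pvMsgOrder.filter (fun m => PySem.Set.contains fired m)) none (some 4)

-- ===== PRECONDITION & SPEC =====
def Spec_generate_contextual_preconditions_py (action : String) (subject : String) (device : String) (description : String) (out : List String) : Prop := out = generate_contextual_preconditions_py_alt action subject device description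
instance (action : String) (subject : String) (device : String) (description : String) (out : List String) : Decidable (Spec_generate_contextual_preconditions_py action subject device description out) := by unfold Spec_generate_contextual_preconditions_py; infer_instance

-- ===== CLAIM (what is proved, stated in full; the proofs are below) =====
def Claim_equal_generate_contextual_preconditions_py : Prop := ∀ (action : String) (subject : String) (device : String) (description : String), Dom_generate_contextual_preconditions_py action subject device description → Spec_generate_contextual_preconditions_py action subject device description (generate_contextual_preconditions_py action subject device description)

-- ===== LEMMAS AND PROOFS =====
-- canonical form: head plus at most 4 fired messages in fixed order
def pvCanon (head : String) (cW cA cF cS cP cI cM : Bool) : List String :=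
  head :: List.take 4 ((if cW then ["Web browser is available and up to date"] else []) ++
    (if cA then ["Admin credentials are available"] else []) ++
    (if cF then ["Firmware / update file is downloaded and available"] else []) ++
    (if cS then ["Serial communication cable is connected"] else []) ++
    (if cP then ["Device is in pairing / discovery mode"] else []) ++
    (if cI then ["Internet connection is available"] else []) ++
    (if cM then ["Monitoring / alarm thresholds are defined"] else []))

def pvChainA (head : String) (cW cA cF cS cP cI cM : Bool) : List String :=
  let preconditions : List String := []
  let preconditions := preconditions ++ [head]
  let preconditions := if cW then preconditions ++ ["Web browser is available and up to date"] else preconditions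
  let preconditions := if cA then preconditions ++ ["Admin credentials are available"] else preconditions
  let preconditions := if cF then preconditions ++ ["Firmware / update file is downloaded and available"] else preconditions
  let preconditions := if cS then preconditions ++ ["Serial communication cable is connected"] else preconditions
  let preconditions := if cP then preconditions ++ ["Device is in pairing / discovery mode"] else preconditions
  let preconditions := if cI then preconditions ++ ["Internet connection is available"] else preconditions
  let preconditions := if cM then preconditions ++ ["Monitoring / alarm thresholds are defined"] else preconditions
  PySem.List.slice preconditions none (some 5)

theorem pvChainA_eq (head : String) (cW cA cF cS cP cI cM : Bool) :
    pvChainA head cW cA cF cS cP cI cM = pvCanon head cW cA cF cS cP cI cM := by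
  unfold pvChainA pvCanon
  cases cW <;> cases cA <;> cases cF <;> cases cS <;> cases cP <;> cases cI <;> cases cM <;> rfl

theorem pvA_as_chainA (action subject device description : String) :
    generate_contextual_preconditions_py action subject device description =
      pvChainA ((if device = "" then "System" else device) ++ " is powered ON and connected to the network")
        (["web", "browser", "interface", "http", "ui"].any (fun kw => PySem.Str.isIn kw (PySem.Str.lower (subject ++ " " ++ device ++ " " ++ description))))
        (["configure", "enable", "disable", "update", "test"].contains action)
        (["firmware", "update", "upgrade", "flash"].any (fun kw => PySem.Str.isIn kw (PySem.Str.lower (subject ++ " " ++ device ++ " " ++ description))))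
        (["modbus", "rs-485", "serial", "rs485"].any (fun kw => PySem.Str.isIn kw (PySem.Str.lower (subject ++ " " ++ device ++ " " ++ description))))
        (["powertag", "wireless", "pairing", "pair"].any (fun kw => PySem.Str.isIn kw (PySem.Str.lower (subject ++ " " ++ device ++ " " ++ description))))
        (["cloud", "publication", "remote", "iot"].any (fun kw => PySem.Str.isIn kw (PySem.Str.lower (subject ++ " " ++ device ++ " " ++ description))))
        (["alarm", "alert", "threshold", "overload"].any (fun kw => PySem.Str.isIn kw (PySem.Str.lower (subject ++ " " ++ device ++ " " ++ description)))) := rfl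

theorem pvChainB_eq (head : String) (d1 d2 d3 d4 d5 d6 d7 : Bool) :
    [head] ++ PySem.List.slice ((if d1 then ["Web browser is available and up to date"] else []) ++
      ((if d2 then ["Admin credentials are available"] else []) ++
      ((if d3 then ["Firmware / update file is downloaded and available"] else []) ++
      ((if d4 then ["Serial communication cable is connected"] else []) ++
      ((if d5 then ["Device is in pairing / discovery mode"] else []) ++
      ((if d6 then ["Internet connection is available"] else []) ++
      (if d7 then ["Monitoring / alarm thresholds are defined"] else []))))))) none (some 4) =
    pvCanon head d1 d2 d3 d4 d5 d6 d7 := by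
  unfold pvCanon
  cases d1 <;> cases d2 <;> cases d3 <;> cases d4 <;> cases d5 <;> cases d6 <;> cases d7 <;> rfl

theorem pvFilter_cons_append {α : Type} (p : α → Bool) (x : α) (xs : List α) :
    (x :: xs).filter p = (if p x then [x] else []) ++ xs.filter p := by
  by_cases h : p x <;> simp [h]

theorem contains_ofList_map_snd_filter {α : Type} (l : List (α × String)) (f : α × String → Bool) (m : String) :
    PySem.Set.contains (PySem.Set.ofList ((l.filter f).map Prod.snd)) m = l.any (fun q => f q && (q.2 == m)) := by
  rw [Bool.eq_iff_iff]
  simp only [PySem.Set.contains_iff, PySem.Set.mem_ofList, List.mem_map, List.mem_filter,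
    List.any_eq_true, Bool.and_eq_true, beq_iff_eq]
  tauto

theorem pvIfBool (b : Bool) : (if b = true then true else false) = b := by cases b <;> rfl

theorem contains_add_str (s : PySem.Set String) (x y : String) :
    PySem.Set.contains (PySem.Set.add s x) y = (PySem.Set.contains s y || y == x) := by
  rw [Bool.eq_iff_iff]
  simp only [PySem.Set.contains_iff, PySem.Set.mem_add, Bool.or_eq_true, beq_iff_eq]


-- ===== VERDICT (by name: the statement is the Claim_ definition above) =====
set_option maxHeartbeats 1000000 in
theorem generate_contextual_preconditions_py_spec : Claim_equal_generate_contextual_preconditions_py := by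
  intro action subject device description _
  unfold Spec_generate_contextual_preconditions_py
  rw [pvA_as_chainA, pvChainA_eq]
  unfold generate_contextual_preconditions_py_alt
  rw [show pvMsgOrder = "Web browser is available and up to date" :: "Admin credentials are available" ::
      "Firmware / update file is downloaded and available" :: "Serial communication cable is connected" ::
      "Device is in pairing / discovery mode" :: "Internet connection is available" ::
      ["Monitoring / alarm thresholds are defined"] from rfl]
  simp only [pvFilter_cons_append, List.filter_nil, List.append_nil]
  simp only [apply_ite (fun (s : PySem.Set String) => PySem.Set.contains s "Web browser is available and up to date"),
    apply_ite (fun (s : PySem.Set String) => PySem.Set.contains s "Admin credentials are available"),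
    apply_ite (fun (s : PySem.Set String) => PySem.Set.contains s "Firmware / update file is downloaded and available"),
    apply_ite (fun (s : PySem.Set String) => PySem.Set.contains s "Serial communication cable is connected"),
    apply_ite (fun (s : PySem.Set String) => PySem.Set.contains s "Device is in pairing / discovery mode"),
    apply_ite (fun (s : PySem.Set String) => PySem.Set.contains s "Internet connection is available"),
    apply_ite (fun (s : PySem.Set String) => PySem.Set.contains s "Monitoring / alarm thresholds are defined"),
    contains_add_str, contains_ofList_map_snd_filter, pvKwMsgs, List.any_cons, List.any_nil,
    String.reduceBEq, beq_self_eq_true, Bool.and_true, Bool.and_false, Bool.or_false,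
    Bool.false_or, ite_self, pvIfBool]
  rw [pvChainB_eq]
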